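-- pv_equiv track=rewrite | github.com/superchee/CS5421 | projects/project2/project2.py | simplifyLHSALL
-- ===== SOURCE A (Python) =====
-- import copy
-- import itertools
--
-- def closure(R, F, S):
--     unused_F = copy.copy(F)
--     S_closure = copy.copy(S)
--
--     while len(unused_F) > 0:
--         bFind = False
--         unused_F_copy = copy.copy(unused_F)
--         for per in unused_F:
--             if set(per[0]).issubset(S_closure): #add the attributes if X in closure
--                 S_closure += list( set(per[1]) - set(S_closure) )
--                 unused_F_copy.remove(per)
--                 bFind = True
--                 break
--         if bFind == False:
--             break #break when no more attributes can be found
--         unused_F = copy.copy(unused_F_copy)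
--     return sorted(S_closure)
--
-- def simplifyLHSALL(R, FD, L_rhs_minimal):
--     L_lhs_minimal = []
--     for fd in L_rhs_minimal:
--         lhs = fd[0]
--         rhs = fd[1]
--         temp = []
--         if (len(lhs) == 1):
--             L_lhs_minimal.append([[lhs, rhs]])
--             continue
--         bFind = False
--         for i in range(1,len(lhs)+1):
--             for itr in list(itertools.combinations(lhs,i)):
--                 if set(rhs).issubset(closure(R,FD,list(itr))):
--                     bFind = True
--                     if any(set(perList[0]).issubset(list(itr)) for perList in temp ):
--                         continue
--                     temp.append([list(itr), rhs])
--         if(not bFind):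
--             L_lhs_minimal.append([[lhs, rhs]])
--         else:
--             L_lhs_minimal.append(temp)
--     return L_lhs_minimal
-- ===== SOURCE B (Python) =====
-- import itertools
--
-- def _closure_fix(FD, S):
--     # attribute closure by round-based saturation: at most len(FD) productive rounds
--     clo = set(S)
--     for _ in range(len(FD)):
--         add = set()
--         for per in FD:
--             if set(per[0]) <= clo:
--                 add |= set(per[1])
--         if add <= clo:
--             break
--         clo |= add
--     return clo
--
-- def _minimal_determinants(FD, lhs, rhs):
--     # scan candidate subsets by increasing size (lex order within a size);
--     # skip supersets of an already-found minimal determinant before computing any closure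
--     target = set(rhs)
--     found = []
--     for i in range(1, len(lhs) + 1):
--         for itr in itertools.combinations(lhs, i):
--             cand = list(itr)
--             if any(set(m) <= set(cand) for m in found):
--                 continue
--             if target <= _closure_fix(FD, cand):
--                 found.append(cand)
--     return found
--
-- def simplifyLHSALL(R, FD, L_rhs_minimal):
--     out = []
--     for fd in L_rhs_minimal:
--         lhs, rhs = fd[0], fd[1]
--         if len(lhs) == 1:
--             out.append([[lhs, rhs]])
--             continue
--         found = _minimal_determinants(FD, lhs, rhs)
--         out.append([[m, rhs] for m in found] if found else [[lhs, rhs]])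
--     return out
-- ===== Notes on version B (the rewrite author's own statement) =====
-- stated objective: faster
-- what changed: B computes the attribute closure by whole-round saturation (bounded by len(FD) rounds) instead of A's rescan-and-remove-one-fd-at-a-time loop, and skips every candidate subset that is a superset of an already-found minimal determinant before computing any closure, where A runs the full closure for every one of the 2^|lhs| subsets.
import Mathlib
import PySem

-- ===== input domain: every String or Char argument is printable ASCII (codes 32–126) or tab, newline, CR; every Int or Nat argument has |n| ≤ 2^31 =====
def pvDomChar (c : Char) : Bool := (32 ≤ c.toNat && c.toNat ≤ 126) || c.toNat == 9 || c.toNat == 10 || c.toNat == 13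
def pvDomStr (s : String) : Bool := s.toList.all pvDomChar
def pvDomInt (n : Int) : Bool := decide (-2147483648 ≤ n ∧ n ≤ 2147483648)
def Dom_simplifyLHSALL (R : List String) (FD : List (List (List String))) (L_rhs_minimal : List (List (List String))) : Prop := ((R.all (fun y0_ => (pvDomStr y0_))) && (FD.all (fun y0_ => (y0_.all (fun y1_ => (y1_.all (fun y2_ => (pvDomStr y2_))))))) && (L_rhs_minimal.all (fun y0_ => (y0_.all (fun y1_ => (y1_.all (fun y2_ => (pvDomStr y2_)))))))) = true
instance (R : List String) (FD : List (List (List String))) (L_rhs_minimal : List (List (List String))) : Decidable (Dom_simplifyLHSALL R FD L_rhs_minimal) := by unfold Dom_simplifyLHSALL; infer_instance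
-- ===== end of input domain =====

-- B replaces A's per-candidate closure (rescanning a shrinking FD copy) by round-based
-- saturation and skips every candidate that is a superset of an already-found minimal
-- determinant before any closure is computed (objective: faster).

-- ===== PORT A =====

-- closure's inner scan: first fd of unused whose lhs ⊆ S_closure; returns the remaining
-- unused list and the extended S_closure.  'S_closure += list(set(per[1]) - set(S_closure))'
-- appends the fresh attributes; Python's set iteration order is unobservable here (the
-- closure is consumed only through sorted() and subset tests), so the set difference is
-- appended in first-occurrence order.
def pvFindA (unused : List (List (List String))) (S : List String) :
    Option (List (List (List String)) × List String) :=
  match unused with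
  | [] => none
  | per :: rest =>
    if PySem.Set.issubset (PySem.Set.ofList (per.getD 0 [])) S then
      some (rest, S ++ PySem.Set.diff (PySem.Set.ofList (per.getD 1 [])) (PySem.Set.ofList S))
    else
      match pvFindA rest S with
      | none => none
      | some (r, S') => some (per :: r, S')

-- the while loop: each successful scan removes exactly one fd, so unused_F.length is fuel
def pvClosLoopA : Nat → List (List (List String)) → List String → List String
  | 0, _, S => S
  | Nat.succ n, unused, S =>
    match pvFindA unused S with
    | none => S
    | some (u', S') => pvClosLoopA n u' S'

def pvClosureA (_R : List String) (F : List (List (List String))) (S : List String) : List String :=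
  PySem.List.sorted (pvClosLoopA F.length F S) (fun x => x) false

-- body of A's double loop over candidate subsets; state = (temp, bFind)
def pvStepA (R : List String) (FD : List (List (List String))) (rhs : List String)
    (st : List (List (List String)) × Bool) (itr : List String) :
    List (List (List String)) × Bool :=
  if PySem.Set.issubset (PySem.Set.ofList rhs) (pvClosureA R FD itr) then
    if st.1.any (fun perList => PySem.Set.issubset (PySem.Set.ofList (perList.getD 0 [])) itr) then
      (st.1, true)
    else
      (st.1 ++ [[itr, rhs]], true)
  else st

def pvInnerA (R : List String) (FD : List (List (List String))) (lhs rhs : List String) :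
    List (List (List String)) × Bool :=
  (PySem.List.pyRange 1 ((lhs.length : Int) + 1) 1).foldl
    (fun st i => (PySem.List.combinations lhs i.toNat).foldl (pvStepA R FD rhs) st)
    ([], false)

-- fd[0]/fd[1] and per[0]/per[1] are ported as getD; Pre_ keeps them in range
def simplifyLHSALL (R : List String) (FD : List (List (List String))) (L_rhs_minimal : List (List (List String))) : List (List (List (List String))) :=
  L_rhs_minimal.foldl
    (fun acc fd =>
      let lhs := fd.getD 0 []
      let rhs := fd.getD 1 []
      if lhs.length == 1 then acc ++ [[[lhs, rhs]]]
      else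
        let st := pvInnerA R FD lhs rhs
        if !st.2 then acc ++ [[[lhs, rhs]]] else acc ++ [st.1])
    []

-- ===== PORT B =====

-- the round's inner loop: 'add' = union of the rhs of every fd applicable in clo
def pvAddB (FD : List (List (List String))) (clo : List String) : List String :=
  FD.foldl
    (fun a per =>
      if PySem.Set.issubset (PySem.Set.ofList (per.getD 0 [])) clo then
        PySem.Set.update a (per.getD 1 [])
      else a)
    PySem.Set.empty

-- one saturation round plus change test; fuel len(FD) (the Python's 'for _ in range(len(FD))')
def pvClosLoopB : Nat → List (List (List String)) → List String → List String
  | 0, _, clo => clo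
  | Nat.succ n, FD, clo =>
    if PySem.Set.issubset (pvAddB FD clo) clo then clo
    else pvClosLoopB n FD (PySem.Set.update clo (pvAddB FD clo))

def pvClosureB (FD : List (List (List String))) (S : List String) : List String :=
  pvClosLoopB FD.length FD (PySem.Set.ofList S)

-- body of B's double loop: prune supersets of found minimal determinants first
def pvStepB (FD : List (List (List String))) (rhs : List String)
    (found : List (List String)) (cand : List String) : List (List String) :=
  if found.any (fun m => PySem.Set.issubset (PySem.Set.ofList m) (PySem.Set.ofList cand)) then
    found
  else if PySem.Set.issubset (PySem.Set.ofList rhs) (pvClosureB FD cand) then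
    found ++ [cand]
  else found

def pvMinDet (FD : List (List (List String))) (lhs rhs : List String) : List (List String) :=
  (PySem.List.pyRange 1 ((lhs.length : Int) + 1) 1).foldl
    (fun found i => (PySem.List.combinations lhs i.toNat).foldl (pvStepB FD rhs) found)
    []

def simplifyLHSALL_alt (R : List String) (FD : List (List (List String))) (L_rhs_minimal : List (List (List String))) : List (List (List (List String))) :=
  L_rhs_minimal.map
    (fun fd =>
      let lhs := fd.getD 0 []
      let rhs := fd.getD 1 []
      if lhs.length == 1 then [[lhs, rhs]]
      else
        let found := pvMinDet FD lhs rhs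
        if found.isEmpty then [[lhs, rhs]] else found.map (fun m => [m, rhs]))

-- ===== PRECONDITION & SPEC =====
-- Pre_ excludes inputs where some fd of L_rhs_minimal has fewer than two components (A reads
-- fd[0] and fd[1] of every fd: IndexError) and, when some lhs has at least two attributes (only
-- then does A run closure over FD), inputs where some element of FD has fewer than two
-- components: there A's per[0]/per[1] can raise IndexError depending on run dynamics, so that
-- whole closed-form class is excluded (slightly narrower than A's exact raising set).
def Pre_simplifyLHSALL (R : List String) (FD : List (List (List String))) (L_rhs_minimal : List (List (List String))) : Prop :=
  (∀ fd ∈ L_rhs_minimal, 2 ≤ fd.length) ∧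
  ((∃ fd ∈ L_rhs_minimal, 2 ≤ (fd.getD 0 []).length) → ∀ per ∈ FD, 2 ≤ per.length)
instance (R : List String) (FD : List (List (List String))) (L_rhs_minimal : List (List (List String))) : Decidable (Pre_simplifyLHSALL R FD L_rhs_minimal) := by unfold Pre_simplifyLHSALL; infer_instance

def pvWitness_simplifyLHSALL : List String × List (List (List String)) × List (List (List String)) :=
  (["A", "B"], [[["A"], ["B"]]], [[["A", "B"], ["B"]]])

def Spec_simplifyLHSALL (R : List String) (FD : List (List (List String))) (L_rhs_minimal : List (List (List String))) (out : List (List (List (List String)))) : Prop := out = simplifyLHSALL_alt R FD L_rhs_minimal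
instance (R : List String) (FD : List (List (List String))) (L_rhs_minimal : List (List (List String))) (out : List (List (List (List String)))) : Decidable (Spec_simplifyLHSALL R FD L_rhs_minimal out) := by unfold Spec_simplifyLHSALL; infer_instance

-- ===== CLAIM (what is proved, stated in full; the proofs are below) =====
def Claim_equal_simplifyLHSALL : Prop := ∀ (R : List String) (FD : List (List (List String))) (L_rhs_minimal : List (List (List String))), Dom_simplifyLHSALL R FD L_rhs_minimal → Pre_simplifyLHSALL R FD L_rhs_minimal → Spec_simplifyLHSALL R FD L_rhs_minimal (simplifyLHSALL R FD L_rhs_minimal)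

-- ===== LEMMAS AND PROOFS =====

-- 'T is closed under the functional dependencies of l'
def pvCls (l : List (List (List String))) (T : List String) : Prop :=
  ∀ per ∈ l, (∀ a ∈ per.getD 0 [], a ∈ T) → ∀ b ∈ per.getD 1 [], b ∈ T

-- A's loop state (temp, bFind) as a function of B's loop state
def pvPm (rhs : List String) (found : List (List String)) :
    List (List (List String)) × Bool :=
  (found.map (fun m => [m, rhs]), !found.isEmpty)

theorem pvIssubset_ofList_right (s t : List String) :
    PySem.Set.issubset s (PySem.Set.ofList t) = PySem.Set.issubset s t := by
  rw [Bool.eq_iff_iff, PySem.Set.issubset_iff, PySem.Set.issubset_iff]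
  simp [PySem.Set.mem_ofList]

theorem pvFindA_some {unused : List (List (List String))} {S : List String}
    {u' : List (List (List String))} {S' : List String}
    (h : pvFindA unused S = some (u', S')) :
    u'.length + 1 = unused.length ∧ (∀ p ∈ u', p ∈ unused) ∧
    ∃ per ∈ unused,
      (∀ a ∈ per.getD 0 [], a ∈ S) ∧
      S' = S ++ PySem.Set.diff (PySem.Set.ofList (per.getD 1 [])) (PySem.Set.ofList S) ∧
      (∀ p ∈ unused, p ∈ u' ∨ p = per) := by
  induction unused generalizing u' S' with
  | nil => simp [pvFindA] at h
  | cons per rest ih =>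
    rw [pvFindA] at h
    split at h
    · rename_i hc
      simp only [Option.some.injEq, Prod.mk.injEq] at h
      obtain ⟨rfl, rfl⟩ := h
      refine ⟨by simp, fun p hp => List.mem_cons_of_mem _ hp,
        per, List.mem_cons_self .., ?_, rfl, ?_⟩
      · intro a ha
        exact (PySem.Set.issubset_iff _ _).1 hc a ((PySem.Set.mem_ofList _ _).2 ha)
      · intro p hp
        rcases List.mem_cons.1 hp with h | h
        · exact Or.inr h
        · exact Or.inl h
    · rename_i hc
      split at h
      · exact absurd h (by simp)
      · rename_i r S0 hrec
        simp only [Option.some.injEq, Prod.mk.injEq] at h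
        obtain ⟨rfl, rfl⟩ := h
        obtain ⟨hlen, hmem, perF, hperF, happ, hS', hsplit⟩ := ih hrec
        refine ⟨by simp only [List.length_cons]; omega, ?_,
          perF, List.mem_cons_of_mem _ hperF, happ, hS', ?_⟩
        · intro p hp
          rcases List.mem_cons.1 hp with rfl | hp
          · exact List.mem_cons_self ..
          · exact List.mem_cons_of_mem _ (hmem p hp)
        · intro p hp
          rcases List.mem_cons.1 hp with rfl | hp
          · exact Or.inl (List.mem_cons_self ..)
          · rcases hsplit p hp with h | h
            · exact Or.inl (List.mem_cons_of_mem _ h)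
            · exact Or.inr h

theorem pvFindA_none {unused : List (List (List String))} {S : List String}
    (h : pvFindA unused S = none) :
    ∀ per ∈ unused, ¬ ∀ a ∈ per.getD 0 [], a ∈ S := by
  induction unused with
  | nil => intro per hper; simp at hper
  | cons per rest ih =>
    rw [pvFindA] at h
    split at h
    · exact absurd h (by simp)
    · rename_i hc
      split at h
      · rename_i hrec
        intro p hp
        rcases List.mem_cons.1 hp with rfl | hp
        · intro hall
          exact hc ((PySem.Set.issubset_iff _ _).2
            (fun x hx => hall x ((PySem.Set.mem_ofList _ _).1 hx)))
        · exact ih hrec p hp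
      · exact absurd h (by simp)

theorem pvClosLoopA_mono {n : Nat} {unused : List (List (List String))} {S : List String}
    {x : String} (hx : x ∈ S) : x ∈ pvClosLoopA n unused S := by
  induction n generalizing unused S with
  | zero => simpa [pvClosLoopA] using hx
  | succ n ih =>
    simp only [pvClosLoopA]
    cases hf : pvFindA unused S with
    | none => exact hx
    | some pr =>
      obtain ⟨u', S'⟩ := pr
      obtain ⟨-, -, per, -, -, hS', -⟩ := pvFindA_some hf
      exact ih (by rw [hS']; exact List.mem_append_left _ hx)

theorem pvClosLoopA_sound {n : Nat} {FD unused : List (List (List String))} {S T : List String}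
    (hu : ∀ p ∈ unused, p ∈ FD) (hS : ∀ x ∈ S, x ∈ T) (hT : pvCls FD T) :
    ∀ x ∈ pvClosLoopA n unused S, x ∈ T := by
  induction n generalizing unused S with
  | zero => intro x hx; simp only [pvClosLoopA] at hx; exact hS x hx
  | succ n ih =>
    intro x hx
    simp only [pvClosLoopA] at hx
    cases hf : pvFindA unused S with
    | none => rw [hf] at hx; exact hS x hx
    | some pr =>
      obtain ⟨u', S'⟩ := pr
      rw [hf] at hx
      obtain ⟨-, hmem, per, hper, happ, hS', -⟩ := pvFindA_some hf
      refine ih (fun p hp => hu p (hmem p hp)) ?_ x hx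
      intro y hy
      rw [hS'] at hy
      rcases List.mem_append.1 hy with hy | hy
      · exact hS y hy
      · have h1 := (PySem.Set.mem_diff _ _ _).1 hy
        exact hT per (hu per hper) (fun a ha => hS a (happ a ha)) y
          ((PySem.Set.mem_ofList _ _).1 h1.1)

theorem pvClosLoopA_closed {n : Nat} {FD : List (List (List String))} :
    ∀ {unused : List (List (List String))} {S : List String},
    unused.length ≤ n →
    (∀ per ∈ FD, per ∈ unused ∨ ∀ b ∈ per.getD 1 [], b ∈ S) →
    pvCls FD (pvClosLoopA n unused S) := by
  induction n with
  | zero =>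
    intro unused S hlen hinv
    cases unused with
    | cons p t => simp at hlen
    | nil =>
      intro per hper hap b hb
      rcases hinv per hper with h | h
      · exact absurd h (List.not_mem_nil)
      · simpa [pvClosLoopA] using h b hb
  | succ n ih =>
    intro unused S hlen hinv
    simp only [pvClosLoopA]
    cases hf : pvFindA unused S with
    | none =>
      intro per hper hap b hb
      rcases hinv per hper with h | h
      · exact absurd hap (pvFindA_none hf per h)
      · exact h b hb
    | some pr =>
      obtain ⟨u', S'⟩ := pr
      obtain ⟨hlen', hmem, perF, hperF, happF, hS', hsplit⟩ := pvFindA_some hf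
      apply ih
      · omega
      · intro per hper
        rcases hinv per hper with h | h
        · rcases hsplit per h with h' | h'
          · exact Or.inl h'
          · subst h'
            refine Or.inr (fun b hb => ?_)
            rw [hS']
            by_cases hbS : b ∈ S
            · exact List.mem_append_left _ hbS
            · exact List.mem_append_right _ ((PySem.Set.mem_diff _ _ _).2
                ⟨(PySem.Set.mem_ofList _ _).2 hb,
                 fun hcm => hbS ((PySem.Set.mem_ofList _ _).1 hcm)⟩)
        · exact Or.inr (fun b hb => by rw [hS']; exact List.mem_append_left _ (h b hb))

theorem pvAddFold_mem (FD : List (List (List String))) (clo : List String)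
    (a0 : List String) (x : String) :
    (x ∈ FD.foldl
      (fun a per =>
        if PySem.Set.issubset (PySem.Set.ofList (per.getD 0 [])) clo then
          PySem.Set.update a (per.getD 1 [])
        else a) a0) ↔
    x ∈ a0 ∨ ∃ per ∈ FD, (∀ a ∈ per.getD 0 [], a ∈ clo) ∧ x ∈ per.getD 1 [] := by
  induction FD generalizing a0 with
  | nil => simp
  | cons per rest ih =>
    simp only [List.foldl_cons]
    by_cases hc : PySem.Set.issubset (PySem.Set.ofList (per.getD 0 [])) clo = true
    · rw [if_pos hc, ih]
      have hap : ∀ a ∈ per.getD 0 [], a ∈ clo :=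
        fun a ha => (PySem.Set.issubset_iff _ _).1 hc a ((PySem.Set.mem_ofList _ _).2 ha)
      constructor
      · rintro (h | ⟨p, hp, h1, h2⟩)
        · rcases (PySem.Set.mem_update _ _ _).1 h with h | h
          · exact Or.inl h
          · exact Or.inr ⟨per, List.mem_cons_self .., hap, h⟩
        · exact Or.inr ⟨p, List.mem_cons_of_mem _ hp, h1, h2⟩
      · rintro (h | ⟨p, hp, h1, h2⟩)
        · exact Or.inl ((PySem.Set.mem_update _ _ _).2 (Or.inl h))
        · rcases List.mem_cons.1 hp with rfl | hp
          · exact Or.inl ((PySem.Set.mem_update _ _ _).2 (Or.inr h2))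
          · exact Or.inr ⟨p, hp, h1, h2⟩
    · rw [if_neg hc, ih]
      constructor
      · rintro (h | ⟨p, hp, h1, h2⟩)
        · exact Or.inl h
        · exact Or.inr ⟨p, List.mem_cons_of_mem _ hp, h1, h2⟩
      · rintro (h | ⟨p, hp, h1, h2⟩)
        · exact Or.inl h
        · rcases List.mem_cons.1 hp with rfl | hp
          · exact absurd ((PySem.Set.issubset_iff _ _).2
              (fun y hy => h1 y ((PySem.Set.mem_ofList _ _).1 hy))) hc
          · exact Or.inr ⟨p, hp, h1, h2⟩

theorem pvAddB_mem (FD : List (List (List String))) (clo : List String) (x : String) :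
    x ∈ pvAddB FD clo ↔ ∃ per ∈ FD, (∀ a ∈ per.getD 0 [], a ∈ clo) ∧ x ∈ per.getD 1 [] := by
  unfold pvAddB
  rw [pvAddFold_mem]
  simp [PySem.Set.empty]

theorem pvClosLoopB_mono {n : Nat} {FD : List (List (List String))} {clo : List String}
    {x : String} (hx : x ∈ clo) : x ∈ pvClosLoopB n FD clo := by
  induction n generalizing clo with
  | zero => simpa [pvClosLoopB] using hx
  | succ n ih =>
    simp only [pvClosLoopB]
    split
    · exact hx
    · exact ih ((PySem.Set.mem_update _ _ _).2 (Or.inl hx))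

theorem pvClosLoopB_sound {n : Nat} {FD : List (List (List String))} {clo T : List String}
    (hS : ∀ x ∈ clo, x ∈ T) (hT : pvCls FD T) :
    ∀ x ∈ pvClosLoopB n FD clo, x ∈ T := by
  induction n generalizing clo with
  | zero => intro x hx; simp only [pvClosLoopB] at hx; exact hS x hx
  | succ n ih =>
    intro x hx
    simp only [pvClosLoopB] at hx
    split at hx
    · exact hS x hx
    · refine ih ?_ x hx
      intro y hy
      rcases (PySem.Set.mem_update _ _ _).1 hy with hy | hy
      · exact hS y hy
      · obtain ⟨per, hper, hap, hy1⟩ := (pvAddB_mem _ _ _).1 hy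
        exact hT per hper (fun a ha => hS a (hap a ha)) y hy1

theorem pvCountP_lt {α : Type} (l : List α) (p q : α → Bool)
    (hmono : ∀ a ∈ l, q a = true → p a = true)
    (x : α) (hx : x ∈ l) (hp : p x = true) (hq : q x = false) :
    l.countP q < l.countP p := by
  induction l with
  | nil => simp at hx
  | cons y l ih =>
    rw [List.countP_cons, List.countP_cons]
    have htail : l.countP q ≤ l.countP p :=
      List.countP_mono_left (fun a ha hqa => hmono a (List.mem_cons_of_mem _ ha) hqa)
    rcases List.mem_cons.1 hx with rfl | hx'
    · rw [hp, hq]; simpa using Nat.lt_succ_of_le htail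
    · have hlt := ih (fun a ha => hmono a (List.mem_cons_of_mem _ ha)) hx'
      have hhead : (if q y then 1 else 0) ≤ (if p y then 1 else 0) := by
        by_cases h : q y = true
        · rw [h, hmono y (List.mem_cons_self ..) h]
        · simp [h]
      omega

theorem pvClosLoopB_closed {n : Nat} {FD : List (List (List String))} :
    ∀ {clo : List String},
    FD.countP (fun per => !PySem.Set.issubset (PySem.Set.ofList (per.getD 1 [])) clo) ≤ n →
    pvCls FD (pvClosLoopB n FD clo) := by
  induction n with
  | zero =>
    intro clo hcnt
    intro per hper hap b hb
    simp only [pvClosLoopB]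
    have h0 := List.countP_eq_zero.1 (Nat.le_zero.1 hcnt) per hper
    have hsub : PySem.Set.issubset (PySem.Set.ofList (per.getD 1 [])) clo = true := by
      cases hval : PySem.Set.issubset (PySem.Set.ofList (per.getD 1 [])) clo
      · exact absurd (by rw [hval]; rfl) h0
      · rfl
    exact (PySem.Set.issubset_iff _ _).1 hsub b ((PySem.Set.mem_ofList _ _).2 hb)
  | succ n ih =>
    intro clo hcnt
    simp only [pvClosLoopB]
    by_cases hbrk : PySem.Set.issubset (pvAddB FD clo) clo = true
    · rw [if_pos hbrk]
      intro per hper hap b hb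
      exact (PySem.Set.issubset_iff _ _).1 hbrk b
        ((pvAddB_mem _ _ _).2 ⟨per, hper, hap, hb⟩)
    · rw [if_neg hbrk]
      apply ih
      have hx : ∃ x ∈ pvAddB FD clo, x ∉ clo := by
        by_contra hno
        refine hbrk ((PySem.Set.issubset_iff _ _).2 (fun y hy => ?_))
        by_contra hyc
        exact hno ⟨y, hy, hyc⟩
      obtain ⟨x, hxadd, hxclo⟩ := hx
      obtain ⟨perW, hperW, hapW, hx1⟩ := (pvAddB_mem _ _ _).1 hxadd
      have hlt :
          FD.countP (fun per => !PySem.Set.issubset (PySem.Set.ofList (per.getD 1 []))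
            (PySem.Set.update clo (pvAddB FD clo)))
          < FD.countP (fun per => !PySem.Set.issubset (PySem.Set.ofList (per.getD 1 [])) clo) := by
        apply pvCountP_lt _ _ _ ?_ perW hperW ?_ ?_
        · intro a _ hqa
          cases hsat : PySem.Set.issubset (PySem.Set.ofList (a.getD 1 [])) clo
          · rfl
          · exfalso
            have hsat' : PySem.Set.issubset (PySem.Set.ofList (a.getD 1 []))
                (PySem.Set.update clo (pvAddB FD clo)) = true :=
              (PySem.Set.issubset_iff _ _).2 (fun y hy =>
                (PySem.Set.mem_update _ _ _).2 (Or.inl ((PySem.Set.issubset_iff _ _).1 hsat y hy)))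
            rw [hsat'] at hqa
            simp at hqa
        · cases hsat : PySem.Set.issubset (PySem.Set.ofList (perW.getD 1 [])) clo
          · rfl
          · exact absurd ((PySem.Set.issubset_iff _ _).1 hsat x
              ((PySem.Set.mem_ofList _ _).2 hx1)) hxclo
        · have hsat' : PySem.Set.issubset (PySem.Set.ofList (perW.getD 1 []))
              (PySem.Set.update clo (pvAddB FD clo)) = true :=
            (PySem.Set.issubset_iff _ _).2 (fun y hy =>
              (PySem.Set.mem_update _ _ _).2 (Or.inr ((pvAddB_mem _ _ _).2
                ⟨perW, hperW, hapW, (PySem.Set.mem_ofList _ _).1 hy⟩)))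
          rw [hsat']
          rfl
      omega

theorem pvClosure_mem (R : List String) (FD : List (List (List String))) (S : List String)
    (x : String) : x ∈ pvClosureA R FD S ↔ x ∈ pvClosureB FD S := by
  unfold pvClosureA pvClosureB
  rw [PySem.List.mem_sorted]
  constructor
  · intro hx
    exact pvClosLoopA_sound (FD := FD) (fun p hp => hp)
      (fun y hy => pvClosLoopB_mono ((PySem.Set.mem_ofList _ _).2 hy))
      (pvClosLoopB_closed (List.countP_le_length)) x hx
  · intro hx
    exact pvClosLoopB_sound
      (fun y hy => pvClosLoopA_mono ((PySem.Set.mem_ofList _ _).1 hy))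
      (pvClosLoopA_closed (le_refl _) (fun per hper => Or.inl hper)) x hx

theorem pvDet_eq (R : List String) (FD : List (List (List String))) (rhs S : List String) :
    PySem.Set.issubset (PySem.Set.ofList rhs) (pvClosureA R FD S)
      = PySem.Set.issubset (PySem.Set.ofList rhs) (pvClosureB FD S) := by
  rw [Bool.eq_iff_iff, PySem.Set.issubset_iff, PySem.Set.issubset_iff]
  constructor <;> intro h x hx
  · exact (pvClosure_mem R FD S x).1 (h x hx)
  · exact (pvClosure_mem R FD S x).2 (h x hx)

theorem pvStep_rel (R : List String) (FD : List (List (List String))) (rhs : List String)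
    (found : List (List String)) (cand : List String) :
    pvStepA R FD rhs (pvPm rhs found) cand = pvPm rhs (pvStepB FD rhs found cand) := by
  unfold pvStepA pvStepB pvPm
  simp only [List.any_map, Function.comp_def, List.getD_cons_zero, pvIssubset_ofList_right,
    pvDet_eq]
  by_cases hP : (found.any fun m => PySem.Set.issubset (PySem.Set.ofList m) cand) = true
  · have hne : found ≠ [] := by
      obtain ⟨m, hm, -⟩ := List.any_eq_true.1 hP
      exact List.ne_nil_of_mem hm
    have hie : found.isEmpty = false := by
      cases found with
      | nil => exact absurd rfl hne
      | cons a t => rfl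
    by_cases hD : PySem.Set.issubset (PySem.Set.ofList rhs) (pvClosureB FD cand) = true
    · simp [hP, hD, hie]
    · simp [hP, hD, hie]
  · by_cases hD : PySem.Set.issubset (PySem.Set.ofList rhs) (pvClosureB FD cand) = true
    · simp [hP, hD]
    · simp [hP, hD]

theorem pvFold_rel (R : List String) (FD : List (List (List String))) (rhs : List String)
    (cs : List (List String)) :
    ∀ found, cs.foldl (pvStepA R FD rhs) (pvPm rhs found)
      = pvPm rhs (cs.foldl (pvStepB FD rhs) found) := by
  induction cs with
  | nil => intro found; rfl
  | cons c cs ih =>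
    intro found
    simp only [List.foldl_cons]
    rw [pvStep_rel]
    exact ih _

theorem pvFold2_rel (R : List String) (FD : List (List (List String))) (lhs rhs : List String)
    (is : List Int) :
    ∀ found,
    is.foldl (fun st i => (PySem.List.combinations lhs i.toNat).foldl (pvStepA R FD rhs) st)
        (pvPm rhs found)
      = pvPm rhs (is.foldl
          (fun f i => (PySem.List.combinations lhs i.toNat).foldl (pvStepB FD rhs) f) found) := by
  induction is with
  | nil => intro found; rfl
  | cons i is ih =>
    intro found
    simp only [List.foldl_cons]
    rw [pvFold_rel]
    exact ih _

theorem pvInner_rel (R : List String) (FD : List (List (List String))) (lhs rhs : List String) :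
    pvInnerA R FD lhs rhs = pvPm rhs (pvMinDet FD lhs rhs) := by
  unfold pvInnerA pvMinDet
  rw [show (([], false) : List (List (List String)) × Bool) = pvPm rhs [] from rfl]
  exact pvFold2_rel R FD lhs rhs _ []

theorem pvMain (R : List String) (FD : List (List (List String)))
    (L : List (List (List String))) :
    simplifyLHSALL R FD L = simplifyLHSALL_alt R FD L := by
  unfold simplifyLHSALL simplifyLHSALL_alt
  suffices h : ∀ acc : List (List (List (List String))),
      L.foldl
        (fun acc fd =>
          let lhs := fd.getD 0 []
          let rhs := fd.getD 1 []
          if lhs.length == 1 then acc ++ [[[lhs, rhs]]]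
          else
            let st := pvInnerA R FD lhs rhs
            if !st.2 then acc ++ [[[lhs, rhs]]] else acc ++ [st.1]) acc
      = acc ++ L.map
          (fun fd =>
            let lhs := fd.getD 0 []
            let rhs := fd.getD 1 []
            if lhs.length == 1 then [[lhs, rhs]]
            else
              let found := pvMinDet FD lhs rhs
              if found.isEmpty then [[lhs, rhs]] else found.map (fun m => [m, rhs])) by
    simpa using h []
  induction L with
  | nil => intro acc; simp
  | cons fd L ih =>
    intro acc
    rw [List.foldl_cons, ih, List.map_cons]
    rw [show ∀ (g : List (List (List String))) gs, acc ++ (g :: gs) = (acc ++ [g]) ++ gs by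
      intro g gs; simp]
    congr 1
    show (if (fd.getD 0 []).length == 1 then acc ++ [[[fd.getD 0 [], fd.getD 1 []]]]
      else if !(pvInnerA R FD (fd.getD 0 []) (fd.getD 1 [])).2
        then acc ++ [[[fd.getD 0 [], fd.getD 1 []]]]
        else acc ++ [(pvInnerA R FD (fd.getD 0 []) (fd.getD 1 [])).1]) = _
    rw [pvInner_rel]
    simp only [pvPm, Bool.not_not]
    generalize fd.getD 0 [] = lhs
    generalize fd.getD 1 [] = rhs
    by_cases h1 : lhs.length = 1
    · simp [h1]
    · by_cases h2 : pvMinDet FD lhs rhs = []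
      · simp [h1, h2]
      · simp [h1, h2]

-- ===== VERDICT (by name: the statement is the Claim_ definition above) =====
theorem simplifyLHSALL_spec : Claim_equal_simplifyLHSALL := by
  intro R FD L _ _
  unfold Spec_simplifyLHSALL
  exact pvMain R FD L
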